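-- pv_equiv track=rewrite | github.com/taik792/LottoElite7 | genera_risultati.py | score_numero
-- ===== SOURCE A (Python) =====
-- def score_numero(numero, storico_ruota):
--     """
--     Score:
--     - frequenza storica
--     - ritardo utile
--     """
--
--     frequenza = 0
--     ritardo = 0
--
--     for estrazione in storico_ruota:
--         if numero in estrazione:
--             frequenza += 1
--
--     trovato = False
--     for i, estrazione in enumerate(reversed(storico_ruota), start=1):
--         if numero in estrazione:
--             ritardo = i
--             trovato = True
--             break
--
--     if not trovato:
--         ritardo = len(storico_ruota)
--
--     return (frequenza * 20) + (ritardo * 5)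
-- ===== SOURCE B (Python) =====
-- def score_numero(numero, storico_ruota):
--     frequenza = 0
--     last_index = None
--     for i, estrazione in enumerate(storico_ruota):
--         if numero in estrazione:
--             frequenza += 1
--             last_index = i
--     if last_index is None:
--         ritardo = len(storico_ruota)
--     else:
--         ritardo = len(storico_ruota) - last_index
--     return (frequenza * 20) + (ritardo * 5)
-- ===== Notes on version B (the rewrite author's own statement) =====
-- stated objective: simpler
-- what changed: Replaces A's two scans (a full frequency pass plus a reversed-with-break delay scan) by a single forward pass that counts hits and tracks the last hit index, deriving the delay as len - last_index.
import Mathlib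
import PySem

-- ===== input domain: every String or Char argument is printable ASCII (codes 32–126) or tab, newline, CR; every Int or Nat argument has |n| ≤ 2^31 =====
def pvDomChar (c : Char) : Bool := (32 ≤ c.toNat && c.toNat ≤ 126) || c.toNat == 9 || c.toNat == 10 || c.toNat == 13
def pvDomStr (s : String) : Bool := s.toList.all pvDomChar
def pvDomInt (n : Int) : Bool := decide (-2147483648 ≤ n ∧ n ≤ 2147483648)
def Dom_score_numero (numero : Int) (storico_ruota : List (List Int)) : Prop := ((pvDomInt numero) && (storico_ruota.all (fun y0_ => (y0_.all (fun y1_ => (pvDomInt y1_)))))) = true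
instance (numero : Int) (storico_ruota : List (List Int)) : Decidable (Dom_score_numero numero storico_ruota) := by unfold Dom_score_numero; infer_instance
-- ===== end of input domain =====

-- B replaces A's two scans (frequency pass + reversed break scan) by one forward pass
-- tracking the count and the last hit index; objective: simpler.

-- ===== PORT A =====
-- the reversed loop with break: first 1-based index i in the reversed list whose draw contains numero
def scanRev (numero : Int) : List (List Int) → Int → Option Int
  | [], _ => none
  | e :: rest, i => if numero ∈ e then some i else scanRev numero rest (i + 1)

def score_numero (numero : Int) (storico_ruota : List (List Int)) : Int :=
  let frequenza : Int := storico_ruota.foldl (fun f e => if numero ∈ e then f + 1 else f) 0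
  let ritardo : Int :=
    match scanRev numero storico_ruota.reverse 1 with
    | some i => i
    | none => (storico_ruota.length : Int)
  frequenza * 20 + ritardo * 5

-- ===== PORT B =====
-- the single enumerate loop: carries (frequenza, last_index) while i advances
def altLoop (numero : Int) : List (List Int) → Int → Int → Option Int → Int × Option Int
  | [], _, f, last => (f, last)
  | e :: rest, i, f, last =>
      if numero ∈ e then altLoop numero rest (i + 1) (f + 1) (some i)
      else altLoop numero rest (i + 1) f last

def score_numero_alt (numero : Int) (storico_ruota : List (List Int)) : Int :=
  let st := altLoop numero storico_ruota 0 0 none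
  let ritardo : Int :=
    match st.2 with
    | none => (storico_ruota.length : Int)
    | some j => (storico_ruota.length : Int) - j
  st.1 * 20 + ritardo * 5

-- ===== PRECONDITION & SPEC =====
def Spec_score_numero (numero : Int) (storico_ruota : List (List Int)) (out : Int) : Prop := out = score_numero_alt numero storico_ruota
instance (numero : Int) (storico_ruota : List (List Int)) (out : Int) : Decidable (Spec_score_numero numero storico_ruota out) := by unfold Spec_score_numero; infer_instance

-- ===== CLAIM (what is proved, stated in full; the proofs are below) =====
def Claim_equal_score_numero : Prop := ∀ (numero : Int) (storico_ruota : List (List Int)), Dom_score_numero numero storico_ruota → Spec_score_numero numero storico_ruota (score_numero numero storico_ruota)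

-- ===== LEMMAS AND PROOFS =====

theorem scanRev_shift (n : Int) (rl : List (List Int)) (k : Int) :
    scanRev n rl (k + 1) = (scanRev n rl k).map (· + 1) := by
  induction rl generalizing k with
  | nil => simp [scanRev]
  | cons e rest ih =>
    simp only [scanRev]
    split_ifs with h
    · simp
    · exact ih (k + 1)

theorem altLoop_snoc (n : Int) (l : List (List Int)) (e : List Int) (i f : Int)
    (last : Option Int) :
    altLoop n (l ++ [e]) i f last =
      (fun p : Int × Option Int =>
        if n ∈ e then (p.1 + 1, some (i + (l.length : Int))) else p) (altLoop n l i f last) := by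
  induction l generalizing i f last with
  | nil => simp [altLoop]
  | cons x rest ih =>
    simp only [List.cons_append, altLoop]
    split_ifs with hx <;> rw [ih] <;> simp only [List.length_cons] <;>
      split_ifs <;> simp <;> omega

theorem altLoop_fst (n : Int) (l : List (List Int)) (i f : Int) (last : Option Int) :
    (altLoop n l i f last).1 = l.foldl (fun a e => if n ∈ e then a + 1 else a) f := by
  induction l generalizing i f last with
  | nil => simp [altLoop]
  | cons e rest ih =>
    simp only [altLoop, List.foldl_cons]
    split_ifs with h <;> exact ih ..

theorem scanRev_eq_altLoop (n : Int) (l : List (List Int)) :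
    scanRev n l.reverse 1 =
      (altLoop n l 0 0 none).2.map (fun j => (l.length : Int) - j) := by
  induction l using List.reverseRecOn with
  | nil => simp [scanRev, altLoop]
  | append_singleton l e ih =>
    rw [List.reverse_append, altLoop_snoc]
    simp only [List.reverse_singleton, List.singleton_append, scanRev]
    split_ifs with h
    · simp
    · rw [scanRev_shift, ih, Option.map_map]
      cases h2 : (altLoop n l 0 0 none).2 <;> simp [Function.comp]; omega

-- ===== VERDICT (by name: the statement is the Claim_ definition above) =====
theorem score_numero_spec : Claim_equal_score_numero := by
  intro numero l _
  simp only [Spec_score_numero, score_numero, score_numero_alt, altLoop_fst, scanRev_eq_altLoop]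
  cases (altLoop numero l 0 0 none).2 <;> simp
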